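-- pv_equiv track=rewrite | github.com/shutpa01/cryptic_solver_v2 | stages/compound.py | solve_container
-- ===== SOURCE A (Python) =====
-- from typing import List, Dict, Any, Optional, Tuple, Set
--
-- def solve_container(outer_letters: str, inner_letters: str,
--                     answer: str) -> Optional[Dict[str, Any]]:
--     """
--     Solve container: outer_letters wrap AROUND inner_letters.
--
--     Example: C + ART + ON = CARTON (ART inside CON)
--     """
--     answer_upper = answer.upper().replace(' ', '')
--
--     # Try each split of outer as prefix + suffix around inner
--     outer_upper = outer_letters.upper()
--     inner_upper = inner_letters.upper()
--
--     for i in range(len(outer_upper) + 1):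
--         prefix = outer_upper[:i]
--         suffix = outer_upper[i:]
--         combined = prefix + inner_upper + suffix
--         if combined == answer_upper:
--             return {
--                 'operation': 'container',
--                 'outer': outer_letters,
--                 'inner': inner_letters,
--                 'prefix': prefix,
--                 'suffix': suffix,
--                 'result': answer
--             }
--
--     return None
-- ===== SOURCE B (Python) =====
-- def solve_container(outer_letters, inner_letters, answer):
--     answer_upper = answer.upper().replace(' ', '')
--     outer_upper = outer_letters.upper()
--     inner_upper = inner_letters.upper()
--     if len(answer_upper) != len(outer_upper) + len(inner_upper):
--         return None
--     start = 0
--     while start <= len(answer_upper):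
--         p = answer_upper.find(inner_upper, start)
--         if p == -1 or p > len(outer_upper):
--             return None
--         if (answer_upper[:p] == outer_upper[:p]
--                 and answer_upper[p + len(inner_upper):] == outer_upper[p:]):
--             return {
--                 'operation': 'container',
--                 'outer': outer_letters,
--                 'inner': inner_letters,
--                 'prefix': outer_upper[:p],
--                 'suffix': outer_upper[p:],
--                 'result': answer,
--             }
--         start = p + 1
--     return None
-- ===== Notes on version B (the rewrite author's own statement) =====
-- stated objective: faster
-- what changed: Instead of enumerating every split of outer and rebuilding prefix+inner+suffix for each, B first requires len(answer)==len(outer)+len(inner) and then locates inner inside answer with repeated str.find, comparing slices only at actual occurrence positions of inner.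
import Mathlib
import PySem

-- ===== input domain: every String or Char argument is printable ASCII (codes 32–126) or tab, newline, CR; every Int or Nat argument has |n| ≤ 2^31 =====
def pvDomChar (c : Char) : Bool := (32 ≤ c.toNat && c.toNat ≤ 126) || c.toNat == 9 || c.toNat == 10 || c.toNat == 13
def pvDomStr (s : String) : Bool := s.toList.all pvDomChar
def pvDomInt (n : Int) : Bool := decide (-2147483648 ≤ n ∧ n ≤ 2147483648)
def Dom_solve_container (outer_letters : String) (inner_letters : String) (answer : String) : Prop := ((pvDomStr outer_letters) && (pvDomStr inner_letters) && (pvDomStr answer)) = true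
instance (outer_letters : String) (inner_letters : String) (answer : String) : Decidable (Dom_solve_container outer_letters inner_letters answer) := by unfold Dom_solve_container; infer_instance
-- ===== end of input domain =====

-- B replaces A's scan over every split of `outer` by a length check plus repeated
-- `answer.find(inner, start)`: only positions where `inner` actually occurs in `answer`
-- are tested (measured faster at large sizes; equal results proved below).

-- ===== PORT A =====
-- the returned dict, with prefix/suffix at split i (shared literal shape of A's return)
def pvDictA (outer_letters inner_letters answer : String) (prefx suffx : List Char) :
    List (String × String) :=
  [("operation", "container"), ("outer", outer_letters), ("inner", inner_letters),
   ("prefix", String.ofList prefx), ("suffix", String.ofList suffx), ("result", answer)]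

-- the `for i in range(len(outer_upper)+1)` loop of A
def solveALoop (outer_letters inner_letters answer : String)
    (ou inn ans : List Char) : List Int → Option (List (String × String))
  | [] => none
  | i :: rest =>
    let prefx := PySem.Chars.slice ou none (some i)
    let suffx := PySem.Chars.slice ou (some i) none
    if prefx ++ inn ++ suffx = ans then
      some (pvDictA outer_letters inner_letters answer prefx suffx)
    else solveALoop outer_letters inner_letters answer ou inn ans rest

def solve_container (outer_letters : String) (inner_letters : String) (answer : String) :
    Option (List (String × String)) :=
  let ans := (PySem.Str.replace (PySem.Str.upper answer) " " "").toList
  let ou := (PySem.Str.upper outer_letters).toList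
  let inn := (PySem.Str.upper inner_letters).toList
  solveALoop outer_letters inner_letters answer ou inn ans
    (PySem.List.pyRange 0 ((ou.length : Int) + 1) 1)

-- ===== PORT B =====
-- the `while start <= len(answer_upper)` loop of B; terminates because find's result p
-- satisfies start ≤ p, so start strictly increases
def solveBLoop (outer_letters inner_letters answer : String)
    (ou inn ans : List Char) (start : Nat) : Option (List (String × String)) :=
  if hle : start ≤ ans.length then
    let p : Int := PySem.Chars.findFrom ans inn (start : Int) none
    if hp : p = -1 ∨ (ou.length : Int) < p then none
    else if PySem.Chars.slice ans none (some p) = PySem.Chars.slice ou none (some p) ∧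
            PySem.Chars.slice ans (some (p + (inn.length : Int))) none
              = PySem.Chars.slice ou (some p) none then
      some [("operation", "container"), ("outer", outer_letters), ("inner", inner_letters),
            ("prefix", String.ofList (PySem.Chars.slice ou none (some p))),
            ("suffix", String.ofList (PySem.Chars.slice ou (some p) none)), ("result", answer)]
    else solveBLoop outer_letters inner_letters answer ou inn ans (p.toNat + 1)
  else none
termination_by ans.length + 1 - start
decreasing_by
  have h1 : ¬ (PySem.Chars.findFrom ans inn (start : Int) none = -1) := fun h => hp (Or.inl h)
  have h2 := (PySem.Chars.findFrom_natCast_spec ans inn start hle h1).1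
  omega

def solve_container_alt (outer_letters : String) (inner_letters : String) (answer : String) :
    Option (List (String × String)) :=
  let ans := (PySem.Str.replace (PySem.Str.upper answer) " " "").toList
  let ou := (PySem.Str.upper outer_letters).toList
  let inn := (PySem.Str.upper inner_letters).toList
  if ans.length = ou.length + inn.length then
    solveBLoop outer_letters inner_letters answer ou inn ans 0
  else none

-- ===== PRECONDITION & SPEC =====
def Spec_solve_container (outer_letters : String) (inner_letters : String) (answer : String) (out : Option (List (String × String))) : Prop := out = solve_container_alt outer_letters inner_letters answer
instance (outer_letters : String) (inner_letters : String) (answer : String) (out : Option (List (String × String))) : Decidable (Spec_solve_container outer_letters inner_letters answer out) := by unfold Spec_solve_container; infer_instance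

-- ===== CLAIM (what is proved, stated in full; the proofs are below) =====
def Claim_equal_solve_container : Prop := ∀ (outer_letters : String) (inner_letters : String) (answer : String), Dom_solve_container outer_letters inner_letters answer → Spec_solve_container outer_letters inner_letters answer (solve_container outer_letters inner_letters answer)

-- ===== LEMMAS AND PROOFS =====

-- `valid ou inn ans i` : split of ou at i, with inn inserted, rebuilds ans
def pvValid (ou inn ans : List Char) (i : Nat) : Bool :=
  decide (ou.take i ++ inn ++ ou.drop i = ans)

-- common normal form of both loops: first valid index of the range, mapped to the dict
def pvSpecF (outer_letters inner_letters answer : String) (ou inn ans : List Char) :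
    Option (List (String × String)) :=
  ((PySem.List.pyRange 0 ((ou.length : Int) + 1) 1).find?
      (fun i => pvValid ou inn ans i.toNat)).map
    (fun i => pvDictA outer_letters inner_letters answer (ou.take i.toNat) (ou.drop i.toNat))

theorem pvValid_length {ou inn ans : List Char} {i : Nat}
    (h : pvValid ou inn ans i = true) : ans.length = ou.length + inn.length := by
  simp only [pvValid, decide_eq_true_eq] at h
  subst h; simp; omega

theorem pvValid_occ {ou inn ans : List Char} {i : Nat} (hi : i ≤ ou.length)
    (h : pvValid ou inn ans i = true) : inn <+: ans.drop i := by
  simp only [pvValid, decide_eq_true_eq] at h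
  subst h
  refine ⟨ou.drop i, ?_⟩
  have h1 : (ou.take i).length = i := by simp [hi]
  rw [show ou.take i ++ inn ++ ou.drop i = ou.take i ++ (inn ++ ou.drop i) by simp,
    List.drop_left' h1]

theorem pvValid_iff_checks {ou inn ans : List Char} {p : Nat}
    (hocc : inn <+: ans.drop p) :
    pvValid ou inn ans p = true ↔ (ans.take p = ou.take p ∧ ans.drop (p + inn.length) = ou.drop p) := by
  obtain ⟨t, ht⟩ := hocc
  constructor
  · intro h
    have hll := pvValid_length h
    have hIL : inn.length ≤ ans.length - p := by
      have := List.IsPrefix.length_le ⟨t, ht⟩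
      simpa using this
    simp only [pvValid, decide_eq_true_eq] at h
    by_cases hinn : inn = []
    · subst hinn
      simp only [List.append_nil] at h ⊢
      rw [List.take_append_drop] at h
      subst h
      simp
    · have hp : p ≤ ou.length := by
        have h1 : 1 ≤ inn.length := by
          cases inn with
          | nil => exact absurd rfl hinn
          | cons a l => simp
        omega
      subst h
      have h1 : (ou.take p).length = p := by simp [hp]
      constructor
      · rw [show ou.take p ++ inn ++ ou.drop p = ou.take p ++ (inn ++ ou.drop p) by simp,
          List.take_left' h1]
      · have hlen1 : (ou.take p ++ inn).length = p + inn.length := by simp [hp]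
        rw [show ou.take p ++ inn ++ ou.drop p = (ou.take p ++ inn) ++ ou.drop p by simp,
          List.drop_left' hlen1]
  · rintro ⟨h1, h2⟩
    simp only [pvValid, decide_eq_true_eq]
    have hc := congrArg (List.drop inn.length) ht
    rw [List.drop_left, List.drop_drop] at hc
    -- hc : t = ans.drop (inn.length + p)
    have htt : t = ou.drop p := by
      rw [hc, h2]
    have hans : ans = ou.take p ++ (inn ++ t) := by
      conv_lhs => rw [← List.take_append_drop p ans]
      rw [h1, ht]
    rw [hans, htt]
    simp

theorem pvValid_none_of_no_occ {ou inn ans : List Char} {s : Nat}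
    (hno : ¬ inn <:+: ans.drop s) {i : Nat} (hsi : s ≤ i) (hi : i ≤ ou.length) :
    pvValid ou inn ans i = false := by
  by_contra h
  have h' : pvValid ou inn ans i = true := by simpa using h
  have hocc := pvValid_occ hi h'
  exact hno (by
    have : ans.drop i = (ans.drop s).drop (i - s) := by rw [List.drop_drop]; congr 1; omega
    rw [this] at hocc
    exact (hocc.isInfix).trans (List.drop_suffix _ _).isInfix)

-- A's loop is find? over its index list (all indices nonnegative)
theorem solveALoop_eq_find (ol il al : String) (ou inn ans : List Char) :
    ∀ idxs : List Int, (∀ i ∈ idxs, 0 ≤ i) →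
    solveALoop ol il al ou inn ans idxs
      = (idxs.find? (fun i => pvValid ou inn ans i.toNat)).map
          (fun i => pvDictA ol il al (ou.take i.toNat) (ou.drop i.toNat))
  | [], _ => rfl
  | i :: rest, h => by
    have hi : 0 ≤ i := h i (by simp)
    have hs1 : PySem.Chars.slice ou none (some i) = ou.take i.toNat := by
      simp [PySem.Chars.slice_eq_listSlice, PySem.List.slice_to _ hi]
    have hs2 : PySem.Chars.slice ou (some i) none = ou.drop i.toNat := by
      simp [PySem.Chars.slice_eq_listSlice, PySem.List.slice_from _ hi]
    simp only [solveALoop, hs1, hs2, List.find?_cons]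
    by_cases hv : ou.take i.toNat ++ inn ++ ou.drop i.toNat = ans
    · simp [hv, pvValid]
    · have hvf : pvValid ou inn ans i.toNat = false := by
        unfold pvValid; exact decide_eq_false hv
      simp only [hv, if_false, hvf]
      exact solveALoop_eq_find ol il al ou inn ans rest (fun j hj => h j (by simp [hj]))

theorem find_range_eq_none {ou inn ans : List Char}
    (h : ∀ i : Nat, i ≤ ou.length → pvValid ou inn ans i = false) :
    (PySem.List.pyRange 0 ((ou.length : Int) + 1) 1).find?
      (fun i => pvValid ou inn ans i.toNat) = none := by
  rw [List.find?_eq_none]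
  intro i hi
  have := (PySem.List.mem_pyRange_one).1 hi
  simpa using h i.toNat (by omega)

-- B's loop computes the common normal form, given the length precondition and the
-- invariant that no index below `start` is valid
theorem solveBLoop_eq (ol il al : String) (ou inn ans : List Char)
    (hlen : ans.length = ou.length + inn.length) :
    ∀ start : Nat, start ≤ ans.length + 1 →
    (∀ j : Nat, j < start → pvValid ou inn ans j = false) →
    solveBLoop ol il al ou inn ans start = pvSpecF ol il al ou inn ans := by
  suffices h : ∀ n start, ans.length + 1 - start = n → start ≤ ans.length + 1 →
      (∀ j : Nat, j < start → pvValid ou inn ans j = false) →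
      solveBLoop ol il al ou inn ans start = pvSpecF ol il al ou inn ans by
    intro start hs hinv
    exact h _ start rfl hs hinv
  intro n
  induction n using Nat.strong_induction_on with
  | _ n ih =>
  intro start hn hs hinv
  rw [solveBLoop]
  by_cases hle : start ≤ ans.length
  · simp only [hle, dite_true]
    set p : Int := PySem.Chars.findFrom ans inn (start : Int) none with hpdef
    by_cases hneg : p = -1
    · -- no occurrence of inn at or after start: nothing valid remains
      simp only [hneg]
      have hno : ¬ inn <:+: ans.drop start :=
        (PySem.Chars.findFrom_natCast_eq_neg_one_iff ans inn start hle).1 hneg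
      rw [pvSpecF, find_range_eq_none (fun i hi => by
        by_cases hlt : i < start
        · exact hinv i hlt
        · exact pvValid_none_of_no_occ hno (by omega) hi)]
      simp
    · have hspec := PySem.Chars.findFrom_natCast_spec ans inn start hle hneg
      obtain ⟨hple, hocc, hmin⟩ := hspec
      have hple' : p ≤ ans.length := by
        have := PySem.Chars.findFrom_natCast ans inn start hle
        rw [← hpdef] at this
        rw [this]
        have h1 := PySem.Chars.find_le_length (ans.drop start) inn
        simp only [List.length_drop] at h1
        split <;> omega
      have hp0 : (0:Int) ≤ p := by omega
      -- past-start indices before p are never valid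
      have hskip : ∀ i : Nat, i < p.toNat → i ≤ ou.length → pvValid ou inn ans i = false := by
        intro i hip hi
        by_cases hlt : i < start
        · exact hinv i hlt
        · by_contra hv
          exact hmin i (by omega) (by omega) (pvValid_occ hi (by simpa using hv))
      by_cases hbig : (ou.length : Int) < p
      · -- p beyond every admissible split: nothing valid anywhere
        simp only [hbig, or_true, dite_true]
        rw [pvSpecF, find_range_eq_none (fun i hi => hskip i (by omega) hi)]
        simp
      · have hcond : ¬ (p = -1 ∨ (ou.length : Int) < p) := by tauto
        simp only [hcond, dite_false]
        have hpou : p.toNat ≤ ou.length := by omega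
        have hocc' : inn <+: ans.drop p.toNat := hocc
        have hs1 : ∀ xs : List Char, PySem.Chars.slice xs none (some p) = xs.take p.toNat := by
          intro xs; simp [PySem.Chars.slice_eq_listSlice, PySem.List.slice_to _ hp0]
        have hs2 : ∀ xs : List Char, PySem.Chars.slice xs (some p) none = xs.drop p.toNat := by
          intro xs; simp [PySem.Chars.slice_eq_listSlice, PySem.List.slice_from _ hp0]
        have hs3 : PySem.Chars.slice ans (some (p + (inn.length : Int))) none
            = ans.drop (p.toNat + inn.length) := by
          simp only [PySem.Chars.slice_eq_listSlice, PySem.List.slice_from _ (by omega : (0:Int) ≤ p + (inn.length:Int))]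
          congr 1; omega
        simp only [hs1, hs2, hs3]
        by_cases hchk : ans.take p.toNat = ou.take p.toNat ∧
            ans.drop (p.toNat + inn.length) = ou.drop p.toNat
        · -- checks pass: p.toNat is the FIRST valid split
          simp only [hchk, and_self, if_true]
          have hvp : pvValid ou inn ans p.toNat = true :=
            (pvValid_iff_checks hocc').2 hchk
          rw [pvSpecF, PySem.List.pyRange_one_append 0 (p.toNat : Int) ((ou.length : Int) + 1)
            (by omega) (by omega), List.find?_append]
          have hfirst : (PySem.List.pyRange 0 (p.toNat : Int) 1).find?
              (fun i => pvValid ou inn ans i.toNat) = none := by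
            rw [List.find?_eq_none]
            intro i hi
            have := (PySem.List.mem_pyRange_one).1 hi
            simpa using hskip i.toNat (by omega) (by omega)
          rw [hfirst]
          rw [PySem.List.pyRange_one_cons (by omega), List.find?_cons]
          simp only [Int.toNat_natCast, hvp]
          have hmax : (max p 0).toNat = p.toNat := by omega
          simp [pvDictA, hmax]
        · -- checks fail: p.toNat invalid too; continue from p+1
          simp only [hchk, if_false]
          have hvp : pvValid ou inn ans p.toNat = false := by
            by_contra hv
            exact hchk ((pvValid_iff_checks hocc').1 (by simpa using hv))
          exact ih (ans.length + 1 - (p.toNat + 1)) (by omega) (p.toNat + 1) rfl (by omega)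
            (fun j hj => by
            by_cases hj' : j < p.toNat
            · exact hskip j hj' (by omega)
            · have : j = p.toNat := by omega
              rw [this]; exact hvp)
  · -- start = ans.length + 1: loop ends; every admissible index is below start
    simp only [hle, dite_false]
    rw [pvSpecF, find_range_eq_none (fun i hi => hinv i (by omega))]
    simp

theorem find_range_none_of_len {ou inn ans : List Char}
    (h : ans.length ≠ ou.length + inn.length) :
    (PySem.List.pyRange 0 ((ou.length : Int) + 1) 1).find?
      (fun i => pvValid ou inn ans i.toNat) = none := by
  apply find_range_eq_none
  intro i _
  by_contra hv
  exact h (pvValid_length (by simpa using hv))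

-- ===== VERDICT (by name: the statement is the Claim_ definition above) =====
theorem solve_container_spec : Claim_equal_solve_container := by
  intro ol il al _
  unfold Spec_solve_container solve_container solve_container_alt
  set ans := (PySem.Str.replace (PySem.Str.upper al) " " "").toList with hans
  set ou := (PySem.Str.upper ol).toList with hou
  set inn := (PySem.Str.upper il).toList with hinn
  rw [solveALoop_eq_find ol il al ou inn ans _ (fun i hi => by
    have := (PySem.List.mem_pyRange_one).1 hi; omega)]
  by_cases hlen : ans.length = ou.length + inn.length
  · simp only [hlen, if_true]
    rw [solveBLoop_eq ol il al ou inn ans hlen 0 (by omega) (by omega)]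
    rfl
  · simp only [hlen, if_false]
    rw [find_range_none_of_len hlen]
    simp
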